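-- pv_equiv track=rewrite | github.com/El-Dringo-Brannde/OSU-Classes | CS-361-SoftwareEngineering1/Notes/Kwic.py | proc_linepairs
-- ===== SOURCE A (Python) =====
-- def Remove_Punctuation(Parsed_Array):
-- 	for b in (range(len(Parsed_Array))):
-- 		for c in (range(len(Parsed_Array[b]))):
-- 			d = 0
-- 			while d != len(Parsed_Array[b][c]): #Removes any puncuation in the strings
-- 				letter = Parsed_Array[b][c][d]
-- 				if (letter == chr(33) or letter == chr(46) or letter == chr(63) or letter == chr(44) or letter == chr(58)):
-- 					Parsed_Array[b][c] = Parsed_Array[b][c][:d]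
-- 				else:
-- 					d +=1
--
-- def Find_WordPairs(Parsed_Array,wordpairs):
-- 	for i in range(len(Parsed_Array)-1): #goes the number of lines
-- 		for f in range(len(Parsed_Array[i]) -1):#goes the number of words in line
-- 			spot1 = Parsed_Array[i][f]
-- 			t = f+1	#prevents from checking before spot1
-- 			while t != int(len(Parsed_Array[i])):#goes to length of line
-- 				spot2 = Parsed_Array[i][t]	#grabs the second word
-- 				q = i+1		#prevents going back before the current string iteration
-- 				while q != len(Parsed_Array): #goes length from where next line is to end
-- 					for x in range(len(Parsed_Array[q])): #goes the number of words in next line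
-- 						check1 = Parsed_Array[q][x]
-- 						if (spot1 == check1 or spot2 == check1):
-- 							w = x +1 #prevents check2 from starting back over in string
-- 							while w != len(Parsed_Array[q]): #repeats while the end of the line hasn't been hit
-- 								check2 = Parsed_Array[q][w]
-- 								if (spot1 == check1 or spot1 == check2) and (spot2 == check2 or spot2 == check1) and (spot1 != spot2):
-- 									pair = spot1 + " " + spot2
-- 									wordpairs[pair] = wordpairs.setdefault(pair,0) + 1
-- 								w +=1
-- 					q += 1
-- 				t += 1
--
-- def proc_linepairs(Parsed_Array,Final_Array,periodsToBreaks):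
-- 	Parsed_Array = [[str.lower(i) for i in j] for j in Parsed_Array]
-- 	Remove_Punctuation(Parsed_Array)
-- 	wordpairs = dict()
-- 	Final_Word_Pairs,holder = ([] for i in range(2))
-- 	Find_WordPairs(Parsed_Array,wordpairs)
-- 	for key,value in wordpairs.items():
-- 		wordcount = wordpairs[key]
-- 		if wordcount == 1:
-- 			wordcount += 1
-- 		holder.append(key)
-- 		holder.append(wordcount)
-- 	i = 0
-- 	while i != len(holder):
-- 		holder[i] = holder[i].split()
-- 		holder[i].sort()
-- 		if len(holder[i]) == 2:
-- 			Final_Word_Pairs.append(tuple([tuple(holder[i])]) + tuple([holder[i + 1]])) #Formatting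
-- 		i +=  2
-- 	Final_Word_Pairs.sort()
-- 	return Final_Word_Pairs
-- ===== SOURCE B (Python) =====
-- def proc_linepairs(Parsed_Array, Final_Array, periodsToBreaks):
--     punct = '!.?,:'
--     # clean: lowercase and cut each word at its first punctuation character
--     lines = []
--     for row in Parsed_Array:
--         cleaned = []
--         for word in row:
--             word = word.lower()
--             cut = len(word)
--             for i, ch in enumerate(word):
--                 if ch in punct:
--                     cut = i
--                     break
--             cleaned.append(word[:cut])
--         lines.append(cleaned)
--     # one word-frequency dict per line
--     freqs = []
--     for line in lines:
--         f = {}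
--         for w in line:
--             f[w] = f.get(w, 0) + 1
--         freqs.append(f)
--     # pair count over later lines = product of the two per-line frequencies, summed
--     wordpairs = {}
--     for i in range(len(lines) - 1):
--         line = lines[i]
--         later = freqs[i + 1:]
--         for a in range(len(line) - 1):
--             s1 = line[a]
--             for b in range(a + 1, len(line)):
--                 s2 = line[b]
--                 if s1 == s2:
--                     continue
--                 total = 0
--                 for fr in later:
--                     if s1 in fr and s2 in fr:
--                         total += fr[s1] * fr[s2]
--                 if total != 0:
--                     key = s1 + " " + s2
--                     wordpairs[key] = wordpairs.get(key, 0) + total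
--     # format: bump 1 -> 2, sorted token pair, drop keys that do not split into two words
--     out = []
--     for key, cnt in wordpairs.items():
--         if cnt == 1:
--             cnt = 2
--         toks = sorted(key.split())
--         if len(toks) == 2:
--             out.append(((toks[0], toks[1]), cnt))
--     out.sort()
--     return out
-- ===== Notes on version B (the rewrite author's own statement) =====
-- stated objective: faster
-- what changed: Replaces A's six-deep scan of every later-line position pair with per-line word-frequency dicts: the count a word pair contributes per later line is the product of the two per-line frequencies, summed over later lines, so the inner two position loops disappear.
import Mathlib
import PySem

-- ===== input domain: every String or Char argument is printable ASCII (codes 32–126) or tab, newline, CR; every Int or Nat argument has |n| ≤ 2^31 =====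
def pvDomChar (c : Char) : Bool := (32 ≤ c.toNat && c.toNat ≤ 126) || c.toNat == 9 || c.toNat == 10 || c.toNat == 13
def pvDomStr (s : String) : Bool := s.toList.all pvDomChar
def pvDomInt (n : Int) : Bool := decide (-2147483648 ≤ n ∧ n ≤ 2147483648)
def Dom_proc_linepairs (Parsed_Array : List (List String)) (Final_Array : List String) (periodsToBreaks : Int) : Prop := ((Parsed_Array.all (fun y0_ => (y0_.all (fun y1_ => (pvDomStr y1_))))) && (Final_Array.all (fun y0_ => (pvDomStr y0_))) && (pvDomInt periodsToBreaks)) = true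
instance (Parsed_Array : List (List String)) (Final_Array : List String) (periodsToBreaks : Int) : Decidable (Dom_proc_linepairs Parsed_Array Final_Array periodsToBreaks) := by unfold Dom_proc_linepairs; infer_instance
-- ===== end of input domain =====

-- B replaces A's six-deep scan over later-line position pairs by per-line word-frequency dicts
-- (pair count per later line = product of the two per-line frequencies), an asymptotically faster algorithm.

-- ===== PORT A =====

-- spot1 + " " + spot2 (both Pythons build this same expression; String.append is kernel-opaque, so concatenate the char lists)
def pvKey (s1 s2 : String) : String := String.ofList (s1.toList ++ ' ' :: s2.toList)

-- sort key for Final_Word_Pairs.sort(): the two token strings are whitespace-free (split() output), and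
-- ' ' is strictly below every non-whitespace printable char, so lexicographic order of this joined string
-- equals Python's tuple order on (tok0, tok1); the Int component is sorted2's second key.
def pvSortKey (e : (String × String) × Int) : String := String.ofList (e.1.1.toList ++ ' ' :: e.1.2.toList)

def pvPunctA (c : Char) : Bool :=
  c == Char.ofNat 33 || c == Char.ofNat 46 || c == Char.ofNat 63 || c == Char.ofNat 44 || c == Char.ofNat 58

-- the 'while d != len(word)' loop of Remove_Punctuation: on truncation the word becomes word[:d],
-- len(word) becomes d and the loop exits returning it; d never exceeds len, so '≤' is the same test.
def rpWordA (w : List Char) (d : Nat) : List Char :=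
  if w.length ≤ d then w
  else if pvPunctA (w.getD d ' ') then PySem.List.slice w none (some (d : Int))
  else rpWordA w (d + 1)
termination_by w.length - d

def rpStrA (s : String) : String := String.ofList (rpWordA s.toList 0)

-- inner 'for c in range(len(Parsed_Array[b]))' with in-place assignment Parsed_Array[b][c] = …
def rpRowA (row : List String) : List String :=
  (List.range row.length).foldl (fun r c => r.set c (rpStrA (r.getD c ""))) row

-- Remove_Punctuation: 'for b in range(len(Parsed_Array))' with in-place assignment of each row
def removePunctA (P : List (List String)) : List (List String) :=
  (List.range P.length).foldl (fun acc b => acc.set b (rpRowA (acc.getD b []))) P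

-- wordpairs[pair] = wordpairs.setdefault(pair, 0) + 1
def pvIncA (d : PySem.Dict String Int) (pair : String) : PySem.Dict String Int :=
  let d1 := d.setdefault pair 0
  d1.insert pair (d1.getD pair 0 + 1)

-- Find_WordPairs: the while loops count upward by 1, i.e. run over the index ranges [f+1,len), [i+1,len), [x+1,len)
def findWordPairsA (P : List (List String)) : PySem.Dict String Int :=
  (List.range (P.length - 1)).foldl (fun d i =>
    let line := P.getD i []
    (List.range (line.length - 1)).foldl (fun d f =>
      let spot1 := line.getD f ""
      (List.range' (f + 1) (line.length - (f + 1))).foldl (fun d t =>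
        let spot2 := line.getD t ""
        (List.range' (i + 1) (P.length - (i + 1))).foldl (fun d q =>
          let ws := P.getD q []
          (List.range ws.length).foldl (fun d x =>
            let check1 := ws.getD x ""
            if spot1 == check1 || spot2 == check1 then
              (List.range' (x + 1) (ws.length - (x + 1))).foldl (fun d w =>
                let check2 := ws.getD w ""
                if (spot1 == check1 || spot1 == check2) && (spot2 == check2 || spot2 == check1) && spot1 != spot2 then
                  pvIncA d (pvKey spot1 spot2)
                else d) d
            else d) d) d) d) d) PySem.Dict.empty

def proc_linepairs (Parsed_Array : List (List String)) (Final_Array : List String) (periodsToBreaks : Int) : List ((String × String) × Int) :=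
  let Parsed := Parsed_Array.map (fun j => j.map (fun i => PySem.Str.lower i))
  let Parsed := removePunctA Parsed
  let wordpairs := findWordPairsA Parsed
  -- holder interleaves key, wordcount; modeled as the list of (key, wordcount) pairs the while loop reads back
  let holder : List (String × Int) := wordpairs.items.foldl (fun h kv =>
    let wordcount := wordpairs.getD kv.1 0
    let wordcount := if wordcount == 1 then wordcount + 1 else wordcount
    h ++ [(kv.1, wordcount)]) []
  let fwp := holder.foldl (fun fwp kc =>
    let toks := PySem.List.sorted (PySem.Str.split₀ kc.1) (fun x => x) false
    if toks.length == 2 then fwp ++ [((toks.getD 0 "", toks.getD 1 ""), kc.2)] else fwp) []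
  PySem.List.sorted2 fwp pvSortKey (fun e => e.2) false

-- ===== PORT B =====

def pvPunctB (c : Char) : Bool := c == '!' || c == '.' || c == '?' || c == ',' || c == ':'

-- lowercase, then cut at the first punctuation character (Source B's enumerate-with-break = findIdx; len if none)
def cleanB (s : String) : String :=
  let w := PySem.Str.lower s
  String.ofList (w.toList.take (w.toList.findIdx pvPunctB))

-- one word-frequency dict per line: f[w] = f.get(w, 0) + 1
def counterB (line : List String) : PySem.Dict String Int :=
  line.foldl (fun f w => f.insert w (f.getD w 0 + 1)) PySem.Dict.empty

-- total = sum over later lines of fr[s1]*fr[s2] when both words occur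
def pairTotalB (later : List (PySem.Dict String Int)) (s1 s2 : String) : Int :=
  later.foldl (fun tot fr =>
    if fr.contains s1 && fr.contains s2 then tot + fr.getD s1 0 * fr.getD s2 0 else tot) 0

def wordpairsB (lines : List (List String)) : PySem.Dict String Int :=
  let freqs := lines.map counterB
  (List.range (lines.length - 1)).foldl (fun wp i =>
    let line := lines.getD i []
    let later := freqs.drop (i + 1)
    (List.range (line.length - 1)).foldl (fun wp a =>
      let s1 := line.getD a ""
      (List.range' (a + 1) (line.length - (a + 1))).foldl (fun wp b =>
        let s2 := line.getD b ""
        if s1 == s2 then wp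
        else
          let total := pairTotalB later s1 s2
          if total != 0 then wp.insert (pvKey s1 s2) (wp.getD (pvKey s1 s2) 0 + total) else wp) wp) wp) PySem.Dict.empty

def proc_linepairs_alt (Parsed_Array : List (List String)) (Final_Array : List String) (periodsToBreaks : Int) : List ((String × String) × Int) :=
  let lines := Parsed_Array.map (fun row => row.map cleanB)
  let wordpairs := wordpairsB lines
  let out := wordpairs.items.foldl (fun out kv =>
    let cnt := if kv.2 == 1 then (2 : Int) else kv.2
    let toks := PySem.List.sorted (PySem.Str.split₀ kv.1) (fun x => x) false
    if toks.length == 2 then out ++ [((toks.getD 0 "", toks.getD 1 ""), cnt)] else out) []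
  PySem.List.sorted2 out pvSortKey (fun e => e.2) false

-- ===== PRECONDITION & SPEC =====
def Spec_proc_linepairs (Parsed_Array : List (List String)) (Final_Array : List String) (periodsToBreaks : Int) (out : List ((String × String) × Int)) : Prop := out = proc_linepairs_alt Parsed_Array Final_Array periodsToBreaks
instance (Parsed_Array : List (List String)) (Final_Array : List String) (periodsToBreaks : Int) (out : List ((String × String) × Int)) : Decidable (Spec_proc_linepairs Parsed_Array Final_Array periodsToBreaks out) := by unfold Spec_proc_linepairs; infer_instance

-- ===== CLAIM (what is proved, stated in full; the proofs are below) =====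
def Claim_equal_proc_linepairs : Prop := ∀ (Parsed_Array : List (List String)) (Final_Array : List String) (periodsToBreaks : Int), Dom_proc_linepairs Parsed_Array Final_Array periodsToBreaks → Spec_proc_linepairs Parsed_Array Final_Array periodsToBreaks (proc_linepairs Parsed_Array Final_Array periodsToBreaks)

-- ===== LEMMAS AND PROOFS =====

-- the two punctuation tests are the same five characters
theorem pv_punct_eq : pvPunctA = pvPunctB := by
  funext c; rfl

-- an index loop 'for b in range(len(l)): l[b] = g(l[b])' is map g
theorem pv_foldl_set {α : Type} (g : α → α) (d0 : α) :
    ∀ (rest done : List α),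
      (List.range' done.length rest.length).foldl (fun acc b => acc.set b (g (acc.getD b d0))) (done ++ rest)
        = done ++ rest.map g := by
  intro rest
  induction rest with
  | nil => intro done; simp
  | cons r rs ih =>
    intro done
    simp only [List.length_cons]
    rw [List.range'_succ]
    simp only [List.foldl_cons]
    have h1 : (done ++ r :: rs).getD done.length d0 = r := by
      simp [List.getD_eq_getElem?_getD, List.getElem?_append_right (Nat.le_refl done.length)]
    have h2 : (done ++ r :: rs).set done.length (g r) = (done ++ [g r]) ++ rs := by
      rw [List.set_append]
      simp
    rw [h1, h2]
    have h3 := ih (done ++ [g r])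
    simp only [List.length_append, List.length_cons, List.length_nil] at h3 ⊢
    simpa using h3

theorem pv_foldl_set_map {α : Type} (g : α → α) (d0 : α) (l : List α) :
    (List.range l.length).foldl (fun acc b => acc.set b (g (acc.getD b d0))) l = l.map g := by
  have := pv_foldl_set g d0 l []
  simpa [List.range_eq_range'] using this

theorem pv_removePunct_map (P : List (List String)) : removePunctA P = P.map rpRowA :=
  pv_foldl_set_map rpRowA [] P

theorem pv_rpRow_map (row : List String) : rpRowA row = row.map rpStrA :=
  pv_foldl_set_map rpStrA "" row

-- the punctuation-truncation while loop cuts the word at its first punctuation character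
theorem pv_rpWord : ∀ (n : Nat) (cs : List Char) (d : Nat), cs.length - d = n → d ≤ cs.length →
    rpWordA cs d = cs.take (d + (cs.drop d).findIdx pvPunctA) := by
  intro n
  induction n with
  | zero =>
    intro cs d hn hd
    rw [rpWordA, if_pos (by omega)]
    have hdl : d = cs.length := by omega
    subst hdl
    simp
  | succ n ih =>
    intro cs d hn hd
    have hlt : d < cs.length := by omega
    rw [rpWordA, if_neg (by omega)]
    have hgd : cs.getD d ' ' = cs[d] := by
      simp [List.getD_eq_getElem?_getD, List.getElem?_eq_getElem hlt]
    have hdrop : cs.drop d = cs[d] :: cs.drop (d + 1) := List.drop_eq_getElem_cons hlt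
    rw [hgd, hdrop, List.findIdx_cons]
    by_cases hp : pvPunctA cs[d] = true
    · rw [if_pos hp, hp]
      simp [PySem.List.slice_to_natCast]
    · have hp' : pvPunctA cs[d] = false := by simpa using hp
      rw [if_neg hp, hp']
      have := ih cs (d + 1) (by omega) (by omega)
      rw [this]
      simp only [cond_false]
      congr 1
      omega

theorem pv_clean_eq (s : String) : rpStrA (PySem.Str.lower s) = cleanB s := by
  unfold rpStrA cleanB
  rw [pv_rpWord ((PySem.Str.lower s).toList.length) _ 0 rfl (Nat.zero_le _)]
  simp [pv_punct_eq]

-- stage 1: A's lowercase comprehension + Remove_Punctuation equals B's per-word cleaning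
theorem pv_cleaned_eq (P : List (List String)) :
    removePunctA (P.map (fun j => j.map (fun i => PySem.Str.lower i)))
      = P.map (fun row => row.map cleanB) := by
  rw [pv_removePunct_map, List.map_map]
  apply List.map_congr_left
  intro row _
  show rpRowA (row.map (fun i => PySem.Str.lower i)) = row.map cleanB
  rw [pv_rpRow_map, List.map_map]
  apply List.map_congr_left
  intro s _
  exact pv_clean_eq s

-- wordpairs[pair] = wordpairs.setdefault(pair,0) + 1 is insert-or-increment
theorem pv_incA_eq (d : PySem.Dict String Int) (k : String) :
    pvIncA d k = d.insert k (d.getD k 0 + 1) := by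
  show (d.setdefault k 0).insert k ((d.setdefault k 0).getD k 0 + 1) = d.insert k (d.getD k 0 + 1)
  by_cases hc : d.contains k = true
  · rw [PySem.Dict.setdefault_of_contains d 0 hc]
  · have hc' : d.contains k = false := by simpa using hc
    rw [PySem.Dict.setdefault_of_not_contains d 0 hc', PySem.Dict.getD_insert_self,
      PySem.Dict.insert_insert_self, PySem.Dict.getD_of_not_contains d 0 hc']

-- m successive insert-or-increments at the same key
def pvIncN (k : String) : Nat → PySem.Dict String Int → PySem.Dict String Int
  | 0, d => d
  | m + 1, d => pvIncN k m (d.insert k (d.getD k 0 + 1))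

theorem pv_incN_add (k : String) (m : Nat) : ∀ (n : Nat) (d : PySem.Dict String Int),
    pvIncN k n (pvIncN k m d) = pvIncN k (m + n) d := by
  induction m with
  | zero => intro n d; simp [pvIncN]
  | succ m ih =>
    intro n d
    have h : m + 1 + n = (m + n) + 1 := by omega
    rw [h, pvIncN, pvIncN, ih]

theorem pv_incN_eq (k : String) : ∀ (m : Nat) (d : PySem.Dict String Int),
    pvIncN k m d = if m = 0 then d else d.insert k (d.getD k 0 + (m : Int)) := by
  intro m
  induction m with
  | zero => intro d; simp [pvIncN]
  | succ m ih =>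
    intro d
    rw [pvIncN, ih]
    by_cases hm : m = 0
    · subst hm; simp [pvIncN]
    · rw [if_neg hm, if_neg (by omega), PySem.Dict.getD_insert_self, PySem.Dict.insert_insert_self]
      congr 1
      push_cast
      ring

theorem pv_foldl_if_inc {α : Type} (k : String) (p : α → Bool) :
    ∀ (l : List α) (d : PySem.Dict String Int),
      l.foldl (fun d c => if p c then d.insert k (d.getD k 0 + 1) else d) d = pvIncN k (l.countP p) d := by
  intro l
  induction l with
  | nil => intro d; simp [pvIncN]
  | cons a l ih =>
    intro d
    rw [List.foldl_cons, List.countP_cons]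
    by_cases hp : p a = true
    · rw [hp, if_pos rfl, ih]
      have h := pv_incN_add k 1 (l.countP p) d
      simp only [pvIncN] at h
      rw [h]
      simp [Nat.add_comm]
    · have hp' : p a = false := by simpa using hp
      rw [hp', if_neg (by simp), ih]
      simp

theorem pv_foldl_incN_sum {α : Type} (k : String) (m : α → Nat) :
    ∀ (l : List α) (d : PySem.Dict String Int),
      l.foldl (fun d x => pvIncN k (m x) d) d = pvIncN k ((l.map m).sum) d := by
  intro l
  induction l with
  | nil => intro d; simp [pvIncN]
  | cons a l ih =>
    intro d
    rw [List.foldl_cons, ih, pv_incN_add]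
    simp

-- 'while q != len(L): … L[q] … ; q += 1' starting at j is a fold over L.drop j
theorem pv_foldl_range'_aux {α σ : Type} (g : σ → α → σ) (d0 : α) :
    ∀ (rest pre : List α) (s : σ),
      (List.range' pre.length rest.length).foldl (fun s q => g s ((pre ++ rest).getD q d0)) s
        = rest.foldl g s := by
  intro rest
  induction rest with
  | nil => intro pre s; simp
  | cons r rs ih =>
    intro pre s
    simp only [List.length_cons]
    rw [List.range'_succ, List.foldl_cons]
    have h1 : (pre ++ r :: rs).getD pre.length d0 = r := by
      simp [List.getD_eq_getElem?_getD, List.getElem?_append_right (Nat.le_refl pre.length)]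
    rw [h1]
    have h2 : pre ++ r :: rs = (pre ++ [r]) ++ rs := by simp
    have h3 := ih (pre ++ [r]) (g s r)
    simp only [List.length_append, List.length_cons, List.length_nil] at h3
    rw [h2]
    simpa using h3

theorem pv_foldl_range'_drop {α σ : Type} (g : σ → α → σ) (d0 : α) (L : List α) (j : Nat)
    (hj : j ≤ L.length) (s : σ) :
    (List.range' j (L.length - j)).foldl (fun s q => g s (L.getD q d0)) s = (L.drop j).foldl g s := by
  obtain ⟨pre, rest, hpre, hL⟩ : ∃ pre rest, pre.length = j ∧ L = pre ++ rest :=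
    ⟨L.take j, L.drop j, by simp [hj], by simp⟩
  subst hL
  have hlen : (pre ++ rest).length - j = rest.length := by
    simp [← hpre]
  rw [hlen, ← hpre, List.drop_left]
  exact pv_foldl_range'_aux g d0 rest pre s

-- 'for x in range(len(ws))' reading ws[x] and scanning ws[x+1:] is a structural pair-fold
def pvPairFold {σ : Type} (g : σ → String → List String → σ) : σ → List String → σ
  | s, [] => s
  | s, c :: rest => pvPairFold g (g s c rest) rest

theorem pv_foldl_range_pair {σ : Type} (g : σ → String → List String → σ) :
    ∀ (ws : List String) (s : σ),
      (List.range ws.length).foldl (fun s x => g s (ws.getD x "") (ws.drop (x + 1))) s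
        = pvPairFold g s ws := by
  intro ws
  induction ws with
  | nil => intro s; simp [pvPairFold]
  | cons c rest ih =>
    intro s
    rw [List.length_cons, List.range_succ_eq_map]
    simp only [List.foldl_cons, List.foldl_map, List.getD_cons_zero, List.drop_succ_cons,
      List.getD_cons_succ]
    rw [pvPairFold]
    exact ih (g s c rest)

-- match count of the (x, w) double scan, outer guard included
def pvM (gd : String → Bool) (p : String → String → Bool) : List String → Nat
  | [] => 0
  | c :: rest => (if gd c then rest.countP (p c) else 0) + pvM gd p rest

theorem pv_pairFold_eq_incN (k : String) (gd : String → Bool) (p : String → String → Bool)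
    (ws : List String) : ∀ d,
    pvPairFold (fun d c1 rest =>
        if gd c1 then
          rest.foldl (fun d c2 => if p c1 c2 then d.insert k (d.getD k 0 + 1) else d) d
        else d) d ws
      = pvIncN k (pvM gd p ws) d := by
  induction ws with
  | nil => intro d; simp [pvPairFold, pvM, pvIncN]
  | cons c rest ih =>
    intro d
    rw [pvPairFold, pvM, ih]
    by_cases hg : gd c = true
    · rw [if_pos hg, if_pos hg, pv_foldl_if_inc, pv_incN_add]
    · rw [if_neg hg, if_neg hg]
      simp

-- evaluating that count: the product of the two occurrence counts (0 when s1 = s2)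
theorem pv_M_eval (s1 s2 : String) : ∀ (ws : List String),
    pvM (fun c1 => s1 == c1 || s2 == c1)
        (fun c1 c2 => (s1 == c1 || s1 == c2) && (s2 == c2 || s2 == c1) && s1 != s2) ws
      = if s1 = s2 then 0 else ws.count s1 * ws.count s2 := by
  intro ws
  induction ws with
  | nil => simp [pvM]
  | cons c rest ih =>
    rw [pvM, ih]
    by_cases hs : s1 = s2
    · simp [hs]
    · rw [if_neg hs, if_neg hs]
      by_cases h1 : c = s1
      · have hg : ((s1 == c) || (s2 == c)) = true := by simp [h1]
        rw [if_pos hg]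
        have hcnt : rest.countP (fun c2 => (s1 == c || s1 == c2) && (s2 == c2 || s2 == c) && s1 != s2)
            = rest.count s2 := by
          rw [List.count_eq_countP]
          apply List.countP_congr
          intro c2 _
          by_cases h2 : c2 = s2
          · simp [h1, h2, hs, Ne.symm hs, bne_iff_ne]
          · simp [h1, h2, hs, bne_iff_ne]
            exact ⟨Ne.symm h2, Ne.symm hs⟩
        rw [hcnt]
        have e1 : (c :: rest).count s1 = rest.count s1 + 1 := by simp [List.count_cons, h1]
        have e2 : (c :: rest).count s2 = rest.count s2 := by simp [List.count_cons, h1, hs]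
        rw [e1, e2]
        ring
      · by_cases h2 : c = s2
        · have hg : ((s1 == c) || (s2 == c)) = true := by simp [h2]
          rw [if_pos hg]
          have hcnt : rest.countP (fun c2 => (s1 == c || s1 == c2) && (s2 == c2 || s2 == c) && s1 != s2)
              = rest.count s1 := by
            rw [List.count_eq_countP]
            apply List.countP_congr
            intro c2 _
            by_cases hc2 : c2 = s1
            · simp [h2, hc2, hs, Ne.symm hs, bne_iff_ne]
            · simp [h2, hc2, hs, bne_iff_ne]
              exact Ne.symm hc2
          rw [hcnt]
          have e1 : (c :: rest).count s1 = rest.count s1 := by simp [List.count_cons, h2, Ne.symm hs]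
          have e2 : (c :: rest).count s2 = rest.count s2 + 1 := by simp [List.count_cons, h2]
          rw [e1, e2]
          ring
        · have t1 : ¬(s1 = c) := fun h => h1 h.symm
          have t2 : ¬(s2 = c) := fun h => h2 h.symm
          have hg : ((s1 == c) || (s2 == c)) = false := by simp [t1, t2]
          rw [hg]
          have e1 : (c :: rest).count s1 = rest.count s1 := by simp [List.count_cons, h1]
          have e2 : (c :: rest).count s2 = rest.count s2 := by simp [List.count_cons, h2]
          rw [e1, e2]
          simp

-- the inner x/w double scan of Find_WordPairs for one later line ws
def pvXloopA (s1 s2 : String) (d : PySem.Dict String Int) (ws : List String) : PySem.Dict String Int :=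
  (List.range ws.length).foldl (fun d x =>
    let check1 := ws.getD x ""
    if s1 == check1 || s2 == check1 then
      (List.range' (x + 1) (ws.length - (x + 1))).foldl (fun d w =>
        let check2 := ws.getD w ""
        if (s1 == check1 || s1 == check2) && (s2 == check2 || s2 == check1) && s1 != s2 then
          pvIncA d (pvKey s1 s2)
        else d) d
    else d) d

theorem pv_xloop_eq (s1 s2 : String) (ws : List String) (d : PySem.Dict String Int) :
    pvXloopA s1 s2 d ws
      = pvIncN (pvKey s1 s2) (if s1 = s2 then 0 else ws.count s1 * ws.count s2) d := by
  unfold pvXloopA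
  refine Eq.trans (PySem.List.foldl_congr_mem _ _
    (fun d x =>
      if (s1 == ws.getD x "" || s2 == ws.getD x "") = true then
        (ws.drop (x + 1)).foldl (fun d c2 =>
          if ((s1 == ws.getD x "" || s1 == c2) && (s2 == c2 || s2 == ws.getD x "") && s1 != s2) = true then
            d.insert (pvKey s1 s2) (d.getD (pvKey s1 s2) 0 + 1)
          else d) d
      else d) d ?_) ?_
  · intro dd x hx
    have hx' : x + 1 ≤ ws.length := by
      have := List.mem_range.mp hx
      omega
    simp only [pv_incA_eq]
    by_cases hg : (s1 == ws.getD x "" || s2 == ws.getD x "") = true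
    · rw [if_pos hg, if_pos hg]
      exact pv_foldl_range'_drop (fun d c2 =>
        if ((s1 == ws.getD x "" || s1 == c2) && (s2 == c2 || s2 == ws.getD x "") && s1 != s2) = true then
          d.insert (pvKey s1 s2) (d.getD (pvKey s1 s2) 0 + 1)
        else d) "" ws (x + 1) hx' dd
    · rw [if_neg hg, if_neg hg]
  · have h2 := pv_foldl_range_pair
      (fun d c1 rest =>
        if (s1 == c1 || s2 == c1) = true then
          rest.foldl (fun d c2 =>
            if ((s1 == c1 || s1 == c2) && (s2 == c2 || s2 == c1) && s1 != s2) = true then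
              d.insert (pvKey s1 s2) (d.getD (pvKey s1 s2) 0 + 1)
            else d) d
        else d) ws d
    refine h2.trans ?_
    rw [pv_pairFold_eq_incN, pv_M_eval]

theorem pv_counterB (line : List String) : counterB line = PySem.Dict.counter line := by
  unfold counterB
  exact PySem.Dict.foldl_insert_getD_add_one_eq_counter line

-- B's per-line product term summed = the Python A match count summed
theorem pv_total_eq (s1 s2 : String) (hs : s1 ≠ s2) (Ls : List (List String)) :
    pairTotalB (Ls.map counterB) s1 s2
      = (((Ls.map (fun ws => ws.count s1 * ws.count s2)).sum : Nat) : Int) := by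
  unfold pairTotalB
  rw [List.foldl_map]
  have hb : ∀ (tot : Int) (ws : List String),
      (if ((counterB ws).contains s1 && (counterB ws).contains s2) = true then
         tot + (counterB ws).getD s1 0 * (counterB ws).getD s2 0
       else tot)
        = tot + ((ws.count s1 * ws.count s2 : Nat) : Int) := by
    intro tot ws
    rw [pv_counterB]
    by_cases hm1 : s1 ∈ ws
    · by_cases hm2 : s2 ∈ ws
      · rw [if_pos (by simp [PySem.Dict.contains_counter, List.elem_eq_contains, hm1, hm2])]
        rw [PySem.Dict.getD_counter, PySem.Dict.getD_counter]
        push_cast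
        ring
      · rw [if_neg (by simp [PySem.Dict.contains_counter, hm2])]
        have hz : ws.count s2 = 0 := by simp [List.count_eq_zero, hm2]
        simp [hz]
    · rw [if_neg (by simp [PySem.Dict.contains_counter, hm1])]
      have hz : ws.count s1 = 0 := by simp [List.count_eq_zero, hm1]
      simp [hz]
  rw [PySem.List.foldl_congr_mem _ _ (fun tot ws => tot + ((ws.count s1 * ws.count s2 : Nat) : Int)) 0
    (fun acc ws _ => hb acc ws)]
  rw [PySem.List.foldl_add]
  rw [Nat.cast_list_sum, List.map_map]
  simp only [Function.comp_def, Nat.cast_mul]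
  simp

-- the whole (q, x, w) machinery for a fixed word pair equals B's total-then-single-insert
theorem pv_body_eq (L : List (List String)) (i : Nat) (hi' : i + 1 ≤ L.length) (s1 s2 : String)
    (wp : PySem.Dict String Int) :
    (List.range' (i + 1) (L.length - (i + 1))).foldl (fun d q => pvXloopA s1 s2 d (L.getD q [])) wp
      = if s1 == s2 then wp
        else
          if pairTotalB ((L.map counterB).drop (i + 1)) s1 s2 != 0 then
            wp.insert (pvKey s1 s2)
              (wp.getD (pvKey s1 s2) 0 + pairTotalB ((L.map counterB).drop (i + 1)) s1 s2)
          else wp := by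
  rw [pv_foldl_range'_drop (fun d ws => pvXloopA s1 s2 d ws) [] L (i + 1) hi' wp]
  rw [PySem.List.foldl_congr_mem _ _
    (fun d ws => pvIncN (pvKey s1 s2) (if s1 = s2 then 0 else ws.count s1 * ws.count s2) d) wp
    (fun acc ws _ => pv_xloop_eq s1 s2 ws acc)]
  rw [pv_foldl_incN_sum]
  by_cases hs : s1 = s2
  · subst hs
    simp [pvIncN]
  · rw [if_neg (by simp [hs])]
    have hd : (L.map counterB).drop (i + 1) = (L.drop (i + 1)).map counterB := by
      rw [List.map_drop]
    rw [hd, pv_total_eq s1 s2 hs (L.drop (i + 1))]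
    have hm : ((L.drop (i + 1)).map fun ws => if s1 = s2 then 0 else ws.count s1 * ws.count s2)
        = ((L.drop (i + 1)).map fun ws => ws.count s1 * ws.count s2) := by
      simp [hs]
    rw [hm, pv_incN_eq]
    by_cases hz : (((L.drop (i + 1)).map fun ws => ws.count s1 * ws.count s2).sum) = 0
    · rw [if_pos hz, hz]
      simp
    · have hcond : ((((L.drop (i + 1)).map fun ws => ws.count s1 * ws.count s2).sum : Nat) : Int) ≠ 0 := by
        exact_mod_cast hz
      rw [if_neg hz, if_pos (by simpa [bne_iff_ne] using hcond)]

-- stage 2: Find_WordPairs builds exactly B's wordpairs dict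
theorem pv_dicts_eq (L : List (List String)) : findWordPairsA L = wordpairsB L := by
  unfold findWordPairsA wordpairsB
  apply PySem.List.foldl_congr_mem
  intro wp i hi
  have hi' : i + 1 ≤ L.length := by
    have := List.mem_range.mp hi
    omega
  apply PySem.List.foldl_congr_mem
  intro wp f _
  apply PySem.List.foldl_congr_mem
  intro wp t _
  exact pv_body_eq L i hi' ((L.getD i []).getD f "") ((L.getD i []).getD t "") wp

theorem pv_foldl_pres {σ α : Type} (Q : σ → Prop) (f : σ → α → σ)
    (hstep : ∀ s x, Q s → Q (f s x)) : ∀ (l : List α) (s : σ), Q s → Q (l.foldl f s) := by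
  intro l
  induction l with
  | nil => intro s h; simpa using h
  | cons a l ih =>
    intro s h
    rw [List.foldl_cons]
    exact ih _ (hstep s a h)

theorem pv_nodup_keys (L : List (List String)) : (wordpairsB L).keys.Nodup := by
  simp only [wordpairsB]
  refine pv_foldl_pres (fun d : PySem.Dict String Int => d.keys.Nodup) _ ?_ _ _ PySem.Dict.nodup_keys_empty
  intro wp i h
  refine pv_foldl_pres (fun d : PySem.Dict String Int => d.keys.Nodup) _ ?_ _ _ h
  intro wp a h'
  refine pv_foldl_pres (fun d : PySem.Dict String Int => d.keys.Nodup) _ ?_ _ _ h'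
  intro wp b h''
  dsimp only
  split_ifs with hc1 hc2
  · exact h''
  · exact PySem.Dict.nodup_keys_insert _ _ _ h''
  · exact h''

-- final assembly
theorem pv_main (Parsed_Array : List (List String)) (Final_Array : List String) (periodsToBreaks : Int) :
    proc_linepairs Parsed_Array Final_Array periodsToBreaks
      = proc_linepairs_alt Parsed_Array Final_Array periodsToBreaks := by
  simp only [proc_linepairs, proc_linepairs_alt]
  rw [pv_cleaned_eq, pv_dicts_eq]
  set wp := wordpairsB (Parsed_Array.map (fun row => row.map cleanB)) with hwp
  have hnd : wp.keys.Nodup := pv_nodup_keys _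
  congr 1
  have hholder : wp.items.foldl (fun h kv =>
      h ++ [(kv.1, if wp.getD kv.1 0 == 1 then wp.getD kv.1 0 + 1 else wp.getD kv.1 0)])
      ([] : List (String × Int))
      = wp.items.map (fun kv => (kv.1, if kv.2 == 1 then kv.2 + 1 else kv.2)) := by
    rw [PySem.List.foldl_congr_mem _ _
      (fun h kv => h ++ [(kv.1, if kv.2 == 1 then kv.2 + 1 else kv.2)]) [] ?_]
    · rw [PySem.List.foldl_append_singleton_eq_map]
      simp
    · intro acc kv hkv
      have hkv' : (kv.1, kv.2) ∈ wp.items := by simpa using hkv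
      rw [PySem.Dict.getD_of_mem_items wp hkv' hnd 0]
  rw [hholder]
  rw [PySem.List.foldl_append_if
    (fun kc : String × Int => (PySem.List.sorted (PySem.Str.split₀ kc.1) (fun x => x) false).length == 2)
    (fun kc : String × Int =>
      (((PySem.List.sorted (PySem.Str.split₀ kc.1) (fun x => x) false).getD 0 "",
        (PySem.List.sorted (PySem.Str.split₀ kc.1) (fun x => x) false).getD 1 ""), kc.2))]
  rw [PySem.List.foldl_append_if
    (fun kv : String × Int => (PySem.List.sorted (PySem.Str.split₀ kv.1) (fun x => x) false).length == 2)
    (fun kv : String × Int =>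
      (((PySem.List.sorted (PySem.Str.split₀ kv.1) (fun x => x) false).getD 0 "",
        (PySem.List.sorted (PySem.Str.split₀ kv.1) (fun x => x) false).getD 1 ""),
        if kv.2 == 1 then (2 : Int) else kv.2))]
  simp only [List.nil_append]
  rw [List.filter_map, List.map_map]
  apply List.map_congr_left
  intro kv _
  simp only [Function.comp]
  by_cases h : kv.2 = 1 <;> simp [h]

-- ===== VERDICT (by name: the statement is the Claim_ definition above) =====
theorem proc_linepairs_spec : Claim_equal_proc_linepairs := by
  intro Parsed_Array Final_Array periodsToBreaks _
  exact pv_main Parsed_Array Final_Array periodsToBreaks
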